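-- pv_equiv track=rewrite | github.com/MiloCS/BoggleFinder | algorithm/gen_counts.py | add_entry
-- ===== SOURCE A (Python) =====
-- alphabet = 'abcdefghijklmnopqrstuvwxyz'
--
-- def add_entry(incoming, word_set, count_dict):
--     if incoming:
--         count = len(list(filter(lambda x: x.startswith(incoming), word_set)))
--         if count:
--             count_dict[incoming] = count
--         else:
--             return count_dict
--     for letter in alphabet:
--         add_entry(incoming+letter, word_set, count_dict)
--     return count_dict
-- ===== SOURCE B (Python) =====
-- alphabet = 'abcdefghijklmnopqrstuvwxyz'
--
-- def add_entry(incoming, word_set, count_dict):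
--     # One pass over the words: for each word, bump a counter for `incoming`
--     # (if non-empty) and for every longer prefix extending `incoming` by
--     # lowercase letters; then write the counts into count_dict in sorted key
--     # order (= the DFS insertion order of the recursive version).
--     counter = {}
--     n = len(incoming)
--     for x in word_set:
--         if x.startswith(incoming):
--             if incoming:
--                 counter[incoming] = counter.get(incoming, 0) + 1
--             i = n
--             while i < len(x) and 'a' <= x[i] <= 'z':
--                 p = x[:i + 1]
--                 counter[p] = counter.get(p, 0) + 1
--                 i += 1
--     for key in sorted(counter):
--         count_dict[key] = counter[key]
--     return count_dict
-- ===== Notes on version B (the rewrite author's own statement) =====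
-- stated objective: alternative
-- what changed: A recursively tries every lowercase extension of the prefix and rescans the whole word list at each node; B makes one pass over the words, incrementing a counter for each lowercase-extension prefix of each word, then writes the counts in sorted-key order (which equals A's DFS insertion order).
import Mathlib
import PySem

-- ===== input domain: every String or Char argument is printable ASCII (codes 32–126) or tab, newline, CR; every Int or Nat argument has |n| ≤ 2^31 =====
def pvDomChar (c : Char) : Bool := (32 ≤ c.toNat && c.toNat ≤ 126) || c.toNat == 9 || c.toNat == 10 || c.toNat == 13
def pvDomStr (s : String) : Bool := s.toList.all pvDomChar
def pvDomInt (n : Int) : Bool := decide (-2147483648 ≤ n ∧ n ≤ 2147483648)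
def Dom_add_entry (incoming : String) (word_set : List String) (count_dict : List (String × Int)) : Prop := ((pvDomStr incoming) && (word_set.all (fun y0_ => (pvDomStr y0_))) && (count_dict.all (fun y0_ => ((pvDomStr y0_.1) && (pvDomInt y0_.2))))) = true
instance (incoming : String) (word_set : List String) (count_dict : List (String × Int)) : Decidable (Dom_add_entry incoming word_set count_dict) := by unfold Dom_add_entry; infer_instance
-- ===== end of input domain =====

-- B replaces A's 26-way recursive scan of word_set per candidate prefix by ONE pass over the
-- words that increments a counter for each lowercase-extension prefix, then writes the counts
-- in sorted-key order (= A's DFS insertion order).  Both Pythons mutate count_dict in place in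
-- the same way; the equivalence proved here is about the returned value.

-- ===== PORT A =====
-- alphabet = 'abcdefghijklmnopqrstuvwxyz'
def pyAlphabet : List Char := "abcdefghijklmnopqrstuvwxyz".toList

-- count = len(list(filter(lambda x: x.startswith(incoming), word_set)))
def cntA (word_set : List String) (pre : List Char) : Int :=
  ((word_set.filter (fun x => PySem.Chars.startswith x.toList pre)).length : Int)

-- fuel-bounded transcription of A's recursion; fuel (maxLenA word_set + 2) is enough because the
-- recursion stops at any non-empty prefix no word starts with (the guard only makes it total).
def add_entry_go (word_set : List String) : Nat → List Char → PySem.Dict String Int → PySem.Dict String Int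
  | 0, _, d => d
  | fuel + 1, pre, d =>
    if pre ≠ [] then
      let count := cntA word_set pre
      if count ≠ 0 then
        pyAlphabet.foldl (fun d c => add_entry_go word_set fuel (pre ++ [c]) d)
          (d.insert (String.ofList pre) count)
      else d
    else
      pyAlphabet.foldl (fun d c => add_entry_go word_set fuel (pre ++ [c]) d) d

def maxLenA (word_set : List String) : Nat :=
  word_set.foldl (fun m x => max m x.toList.length) 0

def add_entry (incoming : String) (word_set : List String) (count_dict : List (String × Int)) : List (String × Int) :=
  (add_entry_go word_set (maxLenA word_set + 2) incoming.toList (PySem.Dict.ofList count_dict)).items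

-- ===== PORT B =====
-- 'a' <= c <= 'z'
def lcChar (c : Char) : Bool := 'a' ≤ c && c ≤ 'z'

-- the while loop of B: walk the lowercase run of the word after the prefix, bumping each prefix
def walkB (pre : List Char) (rest : List Char) (ctr : PySem.Dict String Int) : PySem.Dict String Int :=
  match rest with
  | [] => ctr
  | c :: rest' =>
    if lcChar c then walkB (pre ++ [c]) rest' (ctr.modify (String.ofList (pre ++ [c])) 0 (· + 1))
    else ctr

def add_entry_alt (incoming : String) (word_set : List String) (count_dict : List (String × Int)) : List (String × Int) :=
  let inc := incoming.toList
  let ctr : PySem.Dict String Int :=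
    word_set.foldl (fun ctr x =>
      if PySem.Chars.startswith x.toList inc then
        let ctr := if inc ≠ [] then ctr.modify incoming 0 (· + 1) else ctr
        walkB inc (x.toList.drop inc.length) ctr
      else ctr) PySem.Dict.empty
  ((PySem.List.sorted ctr.keys (fun k => k)).foldl
      (fun d k => d.insert k (ctr.getD k 0)) (PySem.Dict.ofList count_dict)).items

-- ===== PRECONDITION & SPEC =====
def Spec_add_entry (incoming : String) (word_set : List String) (count_dict : List (String × Int)) (out : List (String × Int)) : Prop := out = add_entry_alt incoming word_set count_dict
instance (incoming : String) (word_set : List String) (count_dict : List (String × Int)) (out : List (String × Int)) : Decidable (Spec_add_entry incoming word_set count_dict out) := by unfold Spec_add_entry; infer_instance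

-- ===== CLAIM (what is proved, stated in full; the proofs are below) =====
def Claim_equal_add_entry : Prop := ∀ (incoming : String) (word_set : List String) (count_dict : List (String × Int)), Dom_add_entry incoming word_set count_dict → Spec_add_entry incoming word_set count_dict (add_entry incoming word_set count_dict)

-- ===== LEMMAS AND PROOFS =====

-- the keys A inserts below node `pre`, in A's (depth-first = lexicographic) insertion order
def klist (word_set : List String) : Nat → List Char → List (List Char)
  | 0, _ => []
  | fuel + 1, pre =>
    if pre ≠ [] then
      if cntA word_set pre ≠ 0 then
        pre :: pyAlphabet.flatMap (fun c => klist word_set fuel (pre ++ [c]))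
      else []
    else pyAlphabet.flatMap (fun c => klist word_set fuel (pre ++ [c]))

-- the keys B's inner loops bump for one word
def chainB (pre rest : List Char) : List String :=
  match rest with
  | [] => []
  | c :: rest' => if lcChar c then String.ofList (pre ++ [c]) :: chainB (pre ++ [c]) rest' else []

def contrib (incoming : String) (x : String) : List String :=
  if PySem.Chars.startswith x.toList incoming.toList then
    (if incoming.toList ≠ [] then [incoming] else []) ++
      chainB incoming.toList (x.toList.drop incoming.toList.length)
  else []

-- the keys both sides produce, as a predicate
def goodKey (incoming : String) (word_set : List String) (s : String) : Prop :=
  s.toList ≠ [] ∧ incoming.toList <+: s.toList ∧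
    (∀ c ∈ s.toList.drop incoming.toList.length, lcChar c) ∧
    ∃ x ∈ word_set, s.toList <+: x.toList

lemma mem_alphabet_iff (c : Char) : c ∈ pyAlphabet ↔ lcChar c = true := by
  constructor
  · intro h
    have hall : pyAlphabet.all lcChar = true := by decide
    exact List.all_eq_true.1 hall c h
  · intro h
    simp only [lcChar, Bool.and_eq_true, decide_eq_true_eq] at h
    have h1 : 'a'.toNat ≤ c.toNat := by
      have := h.1; rw [Char.le_def, UInt32.le_iff_toNat_le] at this; exact this
    have h2 : c.toNat ≤ 'z'.toNat := by
      have := h.2; rw [Char.le_def, UInt32.le_iff_toNat_le] at this; exact this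
    have ha : 'a'.toNat = 97 := by decide
    have hz : 'z'.toNat = 122 := by decide
    have hmap : pyAlphabet = (List.range 26).map (fun i => Char.ofNat (97 + i)) := by decide
    rw [hmap]
    refine List.mem_map.2 ⟨c.toNat - 97, List.mem_range.2 (by omega), ?_⟩
    rw [show 97 + (c.toNat - 97) = c.toNat from by omega, Char.ofNat_toNat]

lemma lex_lt_of_prefix_ne (l m : List Char) (h : l <+: m) (hne : l ≠ m) : l < m := by
  obtain ⟨t, rfl⟩ := h
  have ht : t ≠ [] := by rintro rfl; exact hne (by simp)
  clear hne
  have : List.Lex (· < ·) l (l ++ t) := by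
    induction l with
    | nil =>
      cases t with
      | nil => exact absurd rfl ht
      | cons a u => exact List.Lex.nil
    | cons a l ih => exact List.Lex.cons ih
  exact (List.lt_iff_lex_lt l (l ++ t)).2 this

lemma lex_lt_of_prefix_lt (pre : List Char) (c c' : Char) (x y : List Char)
    (hx : pre ++ [c] <+: x) (hy : pre ++ [c'] <+: y) (hcc : c < c') : x < y := by
  obtain ⟨u, rfl⟩ := hx
  obtain ⟨v, rfl⟩ := hy
  have : List.Lex (· < ·) (pre ++ [c] ++ u) (pre ++ [c'] ++ v) := by
    induction pre with
    | nil => exact List.Lex.rel hcc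
    | cons a pre ih => exact List.Lex.cons ih
  exact (List.lt_iff_lex_lt _ _).2 this

lemma cntA_eq_countP (word_set : List String) (pre : List Char) :
    cntA word_set pre = (word_set.countP (fun x => decide (pre <+: x.toList)) : Int) := by
  unfold cntA
  rw [List.countP_eq_length_filter]
  have hf : List.filter (fun x : String => PySem.Chars.startswith x.toList pre) word_set =
      List.filter (fun x => decide (pre <+: x.toList)) word_set := by
    apply List.filter_congr
    intro x _
    by_cases h : pre <+: x.toList
    · simp [h, (PySem.Chars.startswith_iff x.toList pre).2 h]
    · simp only [h, decide_false]
      rw [← Bool.not_eq_true]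
      exact fun hh => h ((PySem.Chars.startswith_iff _ _).1 hh)
  rw [hf]

lemma cntA_eq_zero_iff (word_set : List String) (pre : List Char) :
    cntA word_set pre = 0 ↔ ∀ x ∈ word_set, ¬ pre <+: x.toList := by
  rw [cntA_eq_countP]
  rw [show ((word_set.countP (fun x => decide (pre <+: x.toList)) : Nat) : Int) = 0 ↔
      word_set.countP (fun x => decide (pre <+: x.toList)) = 0 from Int.natCast_eq_zero]
  rw [List.countP_eq_zero]
  simp

lemma len_le_maxLenA (word_set : List String) (x : String) (hx : x ∈ word_set) :
    x.toList.length ≤ maxLenA word_set := by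
  exact (PySem.List.le_foldl_max_nat word_set (fun x => x.toList.length) 0).2 x hx

-- ===== A side =====

lemma go_eq_foldl_klist (word_set : List String) (fuel : Nat) (pre : List Char)
    (d : PySem.Dict String Int) :
    add_entry_go word_set fuel pre d =
      (klist word_set fuel pre).foldl
        (fun d p => d.insert (String.ofList p) (cntA word_set p)) d := by
  induction fuel generalizing pre d with
  | zero => simp [add_entry_go, klist]
  | succ fuel ih =>
    simp only [add_entry_go, klist]
    split_ifs with h1 h2
    · rw [List.foldl_cons, List.foldl_flatMap]
      apply PySem.List.foldl_congr_mem
      intro acc c _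
      exact ih (pre ++ [c]) acc
    · simp
    · rw [List.foldl_flatMap]
      apply PySem.List.foldl_congr_mem
      intro acc c _
      exact ih (pre ++ [c]) acc

lemma klist_prefix (word_set : List String) (fuel : Nat) (pre : List Char)
    (p : List Char) (hp : p ∈ klist word_set fuel pre) : pre <+: p ∧ p ≠ [] := by
  induction fuel generalizing pre with
  | zero => simp [klist] at hp
  | succ fuel ih =>
    rw [klist] at hp
    split_ifs at hp with h1 h2
    · rw [List.mem_cons] at hp
      rcases hp with rfl | hp
      · exact ⟨List.prefix_refl _, h1⟩
      · obtain ⟨c, _, hp⟩ := List.mem_flatMap.1 hp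
        obtain ⟨hpref, hne⟩ := ih _ hp
        exact ⟨(List.prefix_append pre [c]).trans hpref, hne⟩
    · simp at hp
    · obtain ⟨c, _, hp⟩ := List.mem_flatMap.1 hp
      obtain ⟨hpref, hne⟩ := ih _ hp
      rw [not_ne_iff] at h1
      subst h1
      exact ⟨List.nil_prefix, hne⟩

lemma alphabet_pairwise : pyAlphabet.Pairwise (· < ·) := by decide

lemma klist_sorted (word_set : List String) (fuel : Nat) (pre : List Char) :
    (klist word_set fuel pre).Pairwise (· < ·) := by
  induction fuel generalizing pre with
  | zero => simp [klist]
  | succ fuel ih =>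
    have hflat : ∀ q : List Char,
        (pyAlphabet.flatMap (fun c => klist word_set fuel (q ++ [c]))).Pairwise (· < ·) := by
      intro q
      rw [List.pairwise_flatMap]
      refine ⟨fun c _ => ih _, ?_⟩
      exact alphabet_pairwise.imp (fun {c c'} hcc x hx y hy =>
        lex_lt_of_prefix_lt q c c' x y (klist_prefix _ _ _ _ hx).1 (klist_prefix _ _ _ _ hy).1 hcc)
    rw [klist]
    split_ifs with h1 h2
    · refine List.Pairwise.cons ?_ (hflat pre)
      intro q hq
      obtain ⟨c, _, hq⟩ := List.mem_flatMap.1 hq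
      have hpq := (klist_prefix _ _ _ _ hq).1
      have hlen : pre.length + 1 ≤ q.length := by
        have := hpq.length_le
        simpa using this
      refine lex_lt_of_prefix_ne pre q ((List.prefix_append pre [c]).trans hpq) ?_
      intro h
      rw [h] at hlen
      omega
    · simp
    · exact hflat pre

lemma mem_klist_iff (word_set : List String) (fuel : Nat) (pre : List Char)
    (hf : maxLenA word_set + 2 ≤ fuel + pre.length) (p : List Char) :
    p ∈ klist word_set fuel pre ↔
      p ≠ [] ∧ pre <+: p ∧ (∀ c ∈ p.drop pre.length, lcChar c) ∧
        ∃ x ∈ word_set, p <+: x.toList := by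
  induction fuel generalizing pre with
  | zero =>
    rw [klist]
    simp only [List.not_mem_nil, false_iff]
    rintro ⟨h1, h2, h3, x, hx, hpx⟩
    have hm := len_le_maxLenA word_set x hx
    have l1 := h2.length_le
    have l2 := hpx.length_le
    omega
  | succ fuel ih =>
    rw [klist]
    split_ifs with h1 h2
    · simp only [List.mem_cons, List.mem_flatMap]
      constructor
      · rintro (rfl | ⟨c, hc, hp⟩)
        · refine ⟨h1, List.prefix_refl _, by simp, ?_⟩
          by_contra hco
          exact h2 ((cntA_eq_zero_iff _ _).2 (fun x hx hp => hco ⟨x, hx, hp⟩))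
        · obtain ⟨hne, hpref, hlc, w⟩ :=
            (ih (pre ++ [c]) (by simp; omega)).1 hp
          refine ⟨hne, (List.prefix_append pre [c]).trans hpref, ?_, w⟩
          obtain ⟨u, rfl⟩ := hpref
          intro ch hch
          rw [List.append_assoc, List.drop_left] at hch
          rcases List.mem_append.1 hch with hch | hch
          · have hcc : ch = c := by simpa using hch
            exact hcc ▸ (mem_alphabet_iff c).1 hc
          · apply hlc
            rw [List.drop_left]
            exact hch
      · rintro ⟨hne, hpref, hlc, x, hx, hpx⟩
        by_cases hpp : p = pre
        · exact Or.inl hpp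
        · right
          obtain ⟨t, rfl⟩ := hpref
          have ht : t ≠ [] := by rintro rfl; exact hpp (by simp)
          obtain ⟨c, u, rfl⟩ : ∃ c u, t = c :: u := by
            cases t with
            | nil => exact absurd rfl ht
            | cons c u => exact ⟨c, u, rfl⟩
          have hlc' : ∀ ch ∈ c :: u, lcChar ch := by
            intro ch hch
            apply hlc
            rw [List.drop_left]
            exact hch
          have hc : c ∈ pyAlphabet := (mem_alphabet_iff c).2 (hlc' c (by simp))
          refine ⟨c, hc, (ih (pre ++ [c]) (by simp; omega)).2 ⟨hne, ⟨u, by simp⟩, ?_, x, hx, hpx⟩⟩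
          intro ch hch
          rw [show pre ++ (c :: u) = (pre ++ [c]) ++ u from by simp, List.drop_left] at hch
          exact hlc' ch (List.mem_cons_of_mem _ hch)
    · simp only [List.not_mem_nil, false_iff]
      rintro ⟨hne, hpref, hlc, x, hx, hpx⟩
      exact (cntA_eq_zero_iff _ _).1 (not_not.mp h2) x hx (hpref.trans hpx)
    · rw [not_ne_iff] at h1
      subst h1
      simp only [List.mem_flatMap, List.nil_append]
      constructor
      · rintro ⟨c, hc, hp⟩
        obtain ⟨hne, hpref, hlc, w⟩ := (ih [c] (by simp at hf ⊢; omega)).1 hp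
        refine ⟨hne, List.nil_prefix, ?_, w⟩
        obtain ⟨u, rfl⟩ := hpref
        intro ch hch
        simp only [List.length_nil, List.drop_zero] at hch
        rcases List.mem_append.1 hch with hch | hch
        · have hcc : ch = c := by simpa using hch
          exact hcc ▸ (mem_alphabet_iff c).1 hc
        · apply hlc
          simpa using hch
      · rintro ⟨hne, _, hlc, x, hx, hpx⟩
        obtain ⟨c, u, rfl⟩ : ∃ c u, p = c :: u := by
          cases p with
          | nil => exact absurd rfl hne
          | cons c u => exact ⟨c, u, rfl⟩
        have hlc' : ∀ ch ∈ c :: u, lcChar ch := by simpa using hlc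
        have hc : c ∈ pyAlphabet := (mem_alphabet_iff c).2 (hlc' c (by simp))
        refine ⟨c, hc, (ih [c] (by simp at hf ⊢; omega)).2 ⟨hne, ⟨u, rfl⟩, ?_, x, hx, hpx⟩⟩
        intro ch hch
        simp only [List.length_cons, List.length_nil, List.drop_succ_cons, List.drop_zero] at hch
        exact hlc' ch (List.mem_cons_of_mem _ hch)

-- ===== B side =====

lemma walkB_eq (pre rest : List Char) (ctr : PySem.Dict String Int) :
    walkB pre rest ctr = (chainB pre rest).foldl (fun d k => d.modify k 0 (· + 1)) ctr := by
  induction rest generalizing pre ctr with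
  | nil => simp [walkB, chainB]
  | cons c rest ih =>
    rw [walkB, chainB]
    by_cases h : lcChar c
    · simp only [h, if_true, List.foldl_cons]
      exact ih _ _
    · simp [h]

lemma ctrB_eq_counter (incoming : String) (word_set : List String) :
    word_set.foldl (fun ctr x =>
      if PySem.Chars.startswith x.toList incoming.toList then
        let ctr := if incoming.toList ≠ [] then ctr.modify incoming 0 (· + 1) else ctr
        walkB incoming.toList (x.toList.drop incoming.toList.length) ctr
      else ctr) PySem.Dict.empty
    = PySem.Dict.counter (word_set.flatMap (contrib incoming)) := by
  rw [PySem.Dict.counter_eq_foldl, List.foldl_flatMap]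
  apply PySem.List.foldl_congr_mem
  intro acc x _
  dsimp only
  unfold contrib
  by_cases hsw : PySem.Chars.startswith x.toList incoming.toList
  · simp only [hsw, if_true, List.foldl_append]
    split_ifs with hinc
    · rw [List.foldl_cons, List.foldl_nil]
      exact walkB_eq _ _ _
    · rw [List.foldl_nil]
      exact walkB_eq _ _ _
  · rw [if_neg hsw, if_neg hsw, List.foldl_nil]

lemma mem_chainB_iff (pre rest : List Char) (s : String) :
    s ∈ chainB pre rest ↔
      ∃ t, t ≠ [] ∧ t <+: rest ∧ (∀ c ∈ t, lcChar c) ∧ s = String.ofList (pre ++ t) := by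
  induction rest generalizing pre with
  | nil =>
    rw [chainB]
    simp only [List.not_mem_nil, false_iff]
    rintro ⟨t, ht, hpt, _, _⟩
    exact ht (List.prefix_nil.1 hpt)
  | cons c rest ih =>
    rw [chainB]
    by_cases h : lcChar c
    · simp only [h, if_true, List.mem_cons]
      constructor
      · rintro (rfl | hs)
        · exact ⟨[c], by simp, ⟨rest, rfl⟩, by simpa using h, rfl⟩
        · obtain ⟨t, ht, hpt, hlt, rfl⟩ := (ih (pre ++ [c])).1 hs
          refine ⟨c :: t, by simp, ?_, ?_, by simp⟩
          · rw [List.cons_prefix_cons]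
            exact ⟨rfl, hpt⟩
          · intro ch hch
            rcases List.mem_cons.1 hch with rfl | hch
            · exact h
            · exact hlt ch hch
      · rintro ⟨t, ht, hpt, hlt, rfl⟩
        obtain ⟨c', u, rfl⟩ : ∃ c' u, t = c' :: u := by
          cases t with
          | nil => exact absurd rfl ht
          | cons c' u => exact ⟨c', u, rfl⟩
        rw [List.cons_prefix_cons] at hpt
        obtain ⟨hc', hpt⟩ := hpt
        by_cases hu : u = []
        · subst hu
          left
          rw [hc']
        · right
          refine (ih (pre ++ [c])).2 ⟨u, hu, hpt,
            fun ch hch => hlt ch (List.mem_cons_of_mem _ hch), ?_⟩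
          rw [hc']
          simp
    · rw [if_neg h]
      simp only [List.not_mem_nil, false_iff]
      rintro ⟨t, ht, hpt, hlt, rfl⟩
      obtain ⟨c', u, rfl⟩ : ∃ c' u, t = c' :: u := by
        cases t with
        | nil => exact absurd rfl ht
        | cons c' u => exact ⟨c', u, rfl⟩
      rw [List.cons_prefix_cons] at hpt
      refine h ?_
      rw [← hpt.1]
      exact hlt c' (by simp)

lemma chainB_length_gt (pre rest : List Char) (s : String) (hs : s ∈ chainB pre rest) :
    pre.length < s.toList.length := by
  obtain ⟨t, ht, _, _, rfl⟩ := (mem_chainB_iff pre rest s).1 hs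
  rw [String.toList_ofList, List.length_append]
  cases t with
  | nil => exact absurd rfl ht
  | cons c u => simp

lemma nodup_chainB (pre rest : List Char) : (chainB pre rest).Nodup := by
  induction rest generalizing pre with
  | nil => simp [chainB]
  | cons c rest ih =>
    rw [chainB]
    by_cases h : lcChar c
    · simp only [h, if_true, List.nodup_cons]
      refine ⟨fun hmem => ?_, ih _⟩
      have := chainB_length_gt (pre ++ [c]) rest _ hmem
      rw [String.toList_ofList] at this
      simp at this
    · rw [if_neg h]
      simp

lemma nodup_contrib (incoming : String) (x : String) : (contrib incoming x).Nodup := by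
  unfold contrib
  by_cases hsw : PySem.Chars.startswith x.toList incoming.toList
  · simp only [hsw, if_true]
    by_cases hinc : incoming.toList ≠ []
    · rw [if_pos hinc, List.singleton_append, List.nodup_cons]
      refine ⟨fun hmem => ?_, nodup_chainB _ _⟩
      have := chainB_length_gt _ _ _ hmem
      omega
    · rw [if_neg hinc, List.nil_append]
      exact nodup_chainB _ _
  · rw [if_neg hsw]
    simp

lemma mem_contrib_iff (incoming : String) (x : String) (s : String) :
    s ∈ contrib incoming x ↔
      (s.toList ≠ [] ∧ incoming.toList <+: s.toList ∧
        (∀ c ∈ s.toList.drop incoming.toList.length, lcChar c) ∧ s.toList <+: x.toList) := by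
  unfold contrib
  by_cases hsw : PySem.Chars.startswith x.toList incoming.toList
  · have hswp : incoming.toList <+: x.toList := (PySem.Chars.startswith_iff _ _).1 hsw
    have hxeq : incoming.toList ++ x.toList.drop incoming.toList.length = x.toList :=
      List.prefix_iff_eq_append.1 hswp
    simp only [hsw, if_true, List.mem_append]
    constructor
    · rintro (hmem | hmem)
      · by_cases hinc : incoming.toList ≠ []
        · rw [if_pos hinc] at hmem
          have hs : s = incoming := by simpa using hmem
          subst hs
          refine ⟨hinc, List.prefix_refl _, ?_, hswp⟩
          intro c hc
          rw [List.drop_length] at hc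
          exact absurd hc (List.not_mem_nil)
        · rw [if_neg hinc] at hmem
          exact absurd hmem (List.not_mem_nil)
      · obtain ⟨t, ht, hpt, hlt, rfl⟩ := (mem_chainB_iff _ _ _).1 hmem
        rw [String.toList_ofList]
        refine ⟨by simp [ht], List.prefix_append _ _, ?_, ?_⟩
        · rw [List.drop_left]
          exact hlt
        · obtain ⟨u, hu⟩ := hpt
          rw [← hxeq, ← hu, ← List.append_assoc]
          exact List.prefix_append _ _
    · rintro ⟨hne, hpref, hlc, hpx⟩
      have hseq : incoming.toList ++ s.toList.drop incoming.toList.length = s.toList :=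
        List.prefix_iff_eq_append.1 hpref
      by_cases ht : s.toList.drop incoming.toList.length = []
      · left
        rw [ht, List.append_nil] at hseq
        have hs : s = incoming := String.toList_inj.1 hseq.symm
        subst hs
        have hinc : s.toList ≠ [] := hne
        simp [hinc]
      · right
        refine (mem_chainB_iff _ _ _).2 ⟨s.toList.drop incoming.toList.length, ht, ?_, hlc, ?_⟩
        · obtain ⟨u, hu⟩ := hpx
          rw [← hseq, List.append_assoc] at hu
          rw [← hu, List.drop_left]
          exact List.prefix_append _ _
        · rw [hseq]
          exact String.toList_inj.1 (by rw [String.toList_ofList])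
  · rw [if_neg hsw]
    simp only [List.not_mem_nil, false_iff]
    rintro ⟨_, hpref, _, hpx⟩
    exact hsw ((PySem.Chars.startswith_iff _ _).2 (hpref.trans hpx))

lemma count_flat_eq (incoming : String) (word_set : List String) (s : String)
    (h1 : s.toList ≠ []) (h2 : incoming.toList <+: s.toList)
    (h3 : ∀ c ∈ s.toList.drop incoming.toList.length, lcChar c) :
    ((word_set.flatMap (contrib incoming)).count s : Int) = cntA word_set s.toList := by
  rw [List.count_flatMap, cntA_eq_countP]
  congr 1
  have hmap : word_set.map (List.count s ∘ contrib incoming) =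
      word_set.map (fun x => if decide (s.toList <+: x.toList) then 1 else 0) := by
    apply List.map_congr_left
    intro x _
    by_cases hp : s.toList <+: x.toList
    · simp only [hp, decide_true, if_true, Function.comp_apply]
      exact List.count_eq_one_of_mem (nodup_contrib incoming x)
        ((mem_contrib_iff incoming x s).2 ⟨h1, h2, h3, hp⟩)
    · simp only [hp, decide_false, Function.comp_apply]
      have hz : List.count s (contrib incoming x) = 0 := by
        rw [List.count_eq_zero]
        intro hmem
        exact hp ((mem_contrib_iff incoming x s).1 hmem).2.2.2
      simpa using hz
  rw [hmap]
  exact PySem.List.sum_map_ite_one_zero_nat _ _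

lemma mem_flat_iff (incoming : String) (word_set : List String) (s : String) :
    s ∈ word_set.flatMap (contrib incoming) ↔ goodKey incoming word_set s := by
  rw [List.mem_flatMap]
  unfold goodKey
  constructor
  · rintro ⟨x, hx, hmem⟩
    obtain ⟨hne, hpref, hlc, hpx⟩ := (mem_contrib_iff incoming x s).1 hmem
    exact ⟨hne, hpref, hlc, x, hx, hpx⟩
  · rintro ⟨hne, hpref, hlc, x, hx, hpx⟩
    exact ⟨x, hx, (mem_contrib_iff incoming x s).2 ⟨hne, hpref, hlc, hpx⟩⟩

-- ===== assembly =====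

lemma sorted_keys_eq (incoming : String) (word_set : List String) :
    PySem.List.sorted (PySem.Dict.counter (word_set.flatMap (contrib incoming))).keys
        (fun k => k) =
      (klist word_set (maxLenA word_set + 2) incoming.toList).map String.ofList := by
  have hinj : Function.Injective String.ofList := fun a b h => by
    rw [← String.toList_ofList (l := a), h, String.toList_ofList]
  have hnd : (klist word_set (maxLenA word_set + 2) incoming.toList).Nodup :=
    (klist_sorted word_set _ _).imp ne_of_lt
  rw [PySem.Dict.keys_counter]
  apply PySem.List.sorted_eq_of_perm_of_pairwise_lt
  · refine (List.perm_ext_iff_of_nodup (hnd.map hinj) (PySem.Set.nodup_ofList _)).2 ?_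
    intro s
    rw [PySem.Set.mem_ofList, mem_flat_iff, List.mem_map]
    constructor
    · rintro ⟨p, hp, rfl⟩
      have h := (mem_klist_iff word_set _ incoming.toList (by omega) p).1 hp
      unfold goodKey
      rw [String.toList_ofList]
      exact h
    · intro hg
      unfold goodKey at hg
      refine ⟨s.toList, (mem_klist_iff word_set _ incoming.toList (by omega) s.toList).2 hg, ?_⟩
      exact String.toList_inj.1 (by rw [String.toList_ofList])
  · rw [List.pairwise_map]
    refine (klist_sorted word_set _ _).imp ?_
    intro a b hab
    show String.ofList a < String.ofList b
    rw [String.lt_iff_toList_lt, String.toList_ofList, String.toList_ofList]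
    exact hab

-- ===== VERDICT (by name: the statement is the Claim_ definition above) =====
theorem add_entry_spec : Claim_equal_add_entry := by
  intro incoming word_set count_dict _
  show add_entry incoming word_set count_dict = add_entry_alt incoming word_set count_dict
  simp only [add_entry, add_entry_alt]
  rw [ctrB_eq_counter, sorted_keys_eq, go_eq_foldl_klist, List.foldl_map]
  congr 1
  apply PySem.List.foldl_congr_mem
  intro acc p hp
  have hmem := (mem_klist_iff word_set (maxLenA word_set + 2) incoming.toList (by omega) p).1 hp
  have hc : ((word_set.flatMap (contrib incoming)).count (String.ofList p) : Int) = cntA word_set p := by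
    have h := count_flat_eq incoming word_set (String.ofList p)
    rw [String.toList_ofList] at h
    exact h hmem.1 hmem.2.1 hmem.2.2.1
  rw [PySem.Dict.getD_counter, hc]
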